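-- pv_equiv track=rewrite | github.com/jliao1/PythonStudy | LeetCode/LC_String_Longest Semi Alternating九章基础班1课堂例4.py | longestSemiAlternatingSubstring
-- ===== SOURCE A (Python) =====
-- def longestSemiAlternatingSubstring(s):
--     # 比如  "baaabbabbb"
--     # 双指针  | |
--
--     k = 3       # 不能 contain k 个 identical consecutive chars, 本题k是3
--     n = len(s)  # 字符串长度
--
--     # edge case1：先处理异常
--     if s is None or n == 0:
--         return 0
--
--     # edge case2： 如果 输入的字符串s 长度小于3
--     if n < 3:
--         return n
--
--     currMaxLen = 1  # 或者取名叫 res 也行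
--     cnt = 1  # 由于 doesn't contain three identical consecutive characters
--              # 所以需要一个 cnt 来 count 最后一个char(也就是right指向的char) 连续出现的次数，当 >= 3 就不合法了
--              # 由于 left 从0开始，right 从1开始，所以 cnt 和 currMaxLen 初始都是1
--
--     left = 0  # 需要一个左指针，指向从 index = 0 开始
--     # for 的是 right右指针，right 从 index = 1 开始，正常来讲，right走到 s 结尾就停止啦。但是可以做个小优化，如果s剩余的 位数已经 <= currMaxLen了也就没必要往下扫了
--     for right in range(1, n):
--         # 先判断 right 是否等于 right 前一位
--         if s[right] == s[right - 1]:
--             # 若相等,说明多出现了1个连续相等char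
--             cnt += 1
--             # 如果已经连续k个char相等了，left～right之间框定的窗口就不合法了
--             if cnt == k:
--                 # 那就让窗口再次合法，那就把 left 移到 right 的前一位
--                 left = right - (k-2)
--
--                 # # 以下3行代码是个小优化，不写也行
--                 remainingLen = n - left
--                 if remainingLen <= currLen:
--                     return currMaxLen
--
--                 # 此时，由于left在right前一位，count该更新成 k-1（因为目前还是有2个char连续相等的）
--                 cnt = k - 1
--         else:  # right 不等于  right 向后移动一位
--             cnt = 1  # 重新把cnt更新成1 （因为连续没有一个char跟 right 指向的char相等，所以cnt是1）
--
--         currLen = right - left + 1     # 因为left只在count等于3时，才移到right前一位，所以这样是可以计算满足规则内的当前长度的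
--         currMaxLen = max(currMaxLen, currLen)  # 存下当前最大的 len
--
--     return currMaxLen
-- ===== SOURCE B (Python) =====
-- def longestSemiAlternatingSubstring(s):
--     n = len(s)
--     if n < 3:
--         return n
--     # indices i where s[i-2:i+1] is three identical chars; each starts a new segment at i-1
--     breaks = [i for i in range(2, n) if s[i] == s[i - 1] == s[i - 2]]
--     best = 0
--     prev_left = 0
--     for i in breaks:
--         best = max(best, i - prev_left)   # segment [prev_left, i-1] has length i - prev_left
--         prev_left = i - 1
--     return max(best, n - prev_left)       # tail segment [prev_left, n-1]
-- ===== Notes on version B (the rewrite author's own statement) =====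
-- stated objective: alternative
-- what changed: Replaces A's sliding-window scan carrying a run counter, left pointer, current length and an early-return optimization by a two-phase break-index scan: first collect all indices where three identical chars end, then take the max of the segment lengths between consecutive breaks.
import Mathlib
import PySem

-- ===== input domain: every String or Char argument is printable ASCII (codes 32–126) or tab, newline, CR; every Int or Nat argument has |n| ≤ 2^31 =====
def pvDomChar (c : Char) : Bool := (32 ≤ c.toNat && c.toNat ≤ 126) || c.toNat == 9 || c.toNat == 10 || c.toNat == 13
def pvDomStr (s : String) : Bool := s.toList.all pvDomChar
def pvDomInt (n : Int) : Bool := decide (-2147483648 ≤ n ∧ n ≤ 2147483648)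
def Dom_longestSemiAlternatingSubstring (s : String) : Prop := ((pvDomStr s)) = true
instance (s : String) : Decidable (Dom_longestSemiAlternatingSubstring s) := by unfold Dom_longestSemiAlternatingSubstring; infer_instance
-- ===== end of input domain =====

-- B replaces A's sliding-window scan (run counter + left pointer + early return) by a
-- two-phase scan: collect break indices, then take the max segment length between breaks.


-- ===== PORT A =====
-- the for-loop over range(1, n): rights is the remaining list of right-indices;
-- state = (currMaxLen, cnt, left, currLen).  All indices are in range, so s[i] is
-- ported as getD (exact here).  currLen starts at an arbitrary value (0): in Python it
-- is first read only after it was assigned (cnt can reach 3 only at right ≥ 2).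
def pvALoop (cs : List Char) (n : Int) : List Nat → Int → Int → Int → Int → Int
  | [], currMaxLen, _, _, _ => currMaxLen
  | right :: rest, currMaxLen, cnt, left, currLen =>
    if cs.getD right ' ' = cs.getD (right - 1) ' ' then
      let cnt' := cnt + 1
      if cnt' = 3 then
        let left' := (right : Int) - 1
        -- the "small optimization": early return
        if n - left' ≤ currLen then currMaxLen
        else
          let cl := (right : Int) - left' + 1
          pvALoop cs n rest (max currMaxLen cl) 2 left' cl
      else
        let cl := (right : Int) - left + 1
        pvALoop cs n rest (max currMaxLen cl) cnt' left cl
    else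
      let cl := (right : Int) - left + 1
      pvALoop cs n rest (max currMaxLen cl) 1 left cl

def longestSemiAlternatingSubstring (s : String) : Int :=
  let cs := s.toList
  let n := cs.length
  if n = 0 then 0
  else if n < 3 then (n : Int)
  else pvALoop cs (n : Int) (List.range' 1 (n - 1)) 1 1 0 0

-- ===== PORT B =====
def pvIsBrk (cs : List Char) (i : Nat) : Bool :=
  decide (2 ≤ i) && (cs.getD i ' ' == cs.getD (i - 1) ' ') && (cs.getD (i - 1) ' ' == cs.getD (i - 2) ' ')

def longestSemiAlternatingSubstring_alt (s : String) : Int :=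
  let cs := s.toList
  let n := cs.length
  if n < 3 then (n : Int)
  else
    let breaks := (List.range' 2 (n - 2)).filter (pvIsBrk cs)
    let bp := breaks.foldl (fun (st : Int × Int) i => (max st.1 ((i : Int) - st.2), (i : Int) - 1)) (0, 0)
    max bp.1 ((n : Int) - bp.2)

-- ===== PRECONDITION & SPEC =====
def Spec_longestSemiAlternatingSubstring (s : String) (out : Int) : Prop := out = longestSemiAlternatingSubstring_alt s
instance (s : String) (out : Int) : Decidable (Spec_longestSemiAlternatingSubstring s out) := by unfold Spec_longestSemiAlternatingSubstring; infer_instance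

-- ===== CLAIM (what is proved, stated in full; the proofs are below) =====
def Claim_equal_longestSemiAlternatingSubstring : Prop := ∀ (s : String), Dom_longestSemiAlternatingSubstring s → Spec_longestSemiAlternatingSubstring s (longestSemiAlternatingSubstring s)

-- ===== LEMMAS AND PROOFS =====

-- reference function: B's fold + final tail max, written recursively
def pvG (n : Int) : List Nat → Int → Int → Int
  | [], b, p => max b (n - p)
  | i :: t, b, p => pvG n t (max b ((i : Int) - p)) ((i : Int) - 1)

lemma pvG_foldl (n : Int) (l : List Nat) (b p : Int) :
    (let bp := l.foldl (fun (st : Int × Int) i => (max st.1 ((i : Int) - st.2), (i : Int) - 1)) (b, p);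
     max bp.1 (n - bp.2)) = pvG n l b p := by
  induction l generalizing b p with
  | nil => simp [pvG]
  | cons i t ih => simpa [pvG, List.foldl] using ih (max b ((i : Int) - p)) ((i : Int) - 1)

lemma pvG_max (n : Int) (l : List Nat) (b c p : Int) :
    pvG n l (max b c) p = max c (pvG n l b p) := by
  induction l generalizing b p with
  | nil => simp [pvG]; omega
  | cons i t ih =>
      simp only [pvG]
      rw [show max (max b c) ((i : Int) - p) = max (max b ((i : Int) - p)) c by omega, ih]

lemma pvG_ge_seed (n : Int) (l : List Nat) (b p : Int) : b ≤ pvG n l b p := by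
  induction l generalizing b p with
  | nil => simp [pvG]
  | cons i t ih => exact le_trans (le_max_left _ _) (ih _ _)

lemma pvG_absorb (n : Int) (r : Nat) (l : List Nat) (M p : Int)
    (hl : ∀ i ∈ l, r ≤ i ∧ (i : Int) < n)
    (hp : (r : Int) - 1 ≤ p) (hM : n - ((r : Int) - 1) ≤ M) : pvG n l M p = M := by
  induction l generalizing p with
  | nil => simp [pvG]; omega
  | cons i t ih =>
      obtain ⟨hri, hin⟩ := hl i (List.mem_cons_self)
      have hri' : (r : Int) ≤ (i : Int) := by exact_mod_cast hri
      have h1 : (i : Int) - p ≤ M := by omega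
      simp only [pvG, show max M ((i : Int) - p) = M by omega]
      exact ih _ (fun j hj => hl j (List.mem_cons_of_mem _ hj)) (by omega)

lemma pvG_pos (n : Int) (l : List Nat) (b p : Int)
    (hl : ∀ i ∈ l, 2 ≤ i ∧ (i : Int) < n) (hp : p ≤ n - 2) : 1 ≤ pvG n l b p := by
  induction l generalizing b p with
  | nil => simp [pvG]; omega
  | cons i t ih =>
      obtain ⟨h2, hin⟩ := hl i (List.mem_cons_self)
      have h2' : (2 : Int) ≤ (i : Int) := by exact_mod_cast h2
      simp only [pvG]
      exact ih _ _ (fun j hj => hl j (List.mem_cons_of_mem _ hj)) (by omega)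

lemma pvG_ge (n : Int) (l : List Nat) (M p c : Int)
    (h1 : ∀ i ∈ l, c + p ≤ (i : Int)) (h2 : c + p ≤ n) : c ≤ pvG n l M p := by
  cases l with
  | nil => simp [pvG]; omega
  | cons i t =>
      have hi := h1 i (List.mem_cons_self)
      calc c ≤ max M ((i : Int) - p) := by omega
        _ ≤ pvG n t (max M ((i : Int) - p)) ((i : Int) - 1) := pvG_ge_seed _ _ _ _
        _ = pvG n (i :: t) M p := rfl

-- main invariant lemma: A's loop from index r equals B's break-scan over the remaining indices
lemma pvALoop_eq_pvG (cs : List Char) (n : Nat) (hn : n = cs.length) :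
    ∀ (k r : Nat) (M cnt L CL : Int), r + k = n → 1 ≤ r →
    0 ≤ L → L ≤ (r : Int) - 1 →
    (r : Int) - L ≤ M →
    cnt = (if 2 ≤ r ∧ cs.getD (r - 1) ' ' = cs.getD (r - 2) ' ' then 2 else 1) →
    (2 ≤ r → CL = (r : Int) - L) →
    (2 ≤ r → 2 ≤ M) →
    pvALoop cs (n : Int) (List.range' r k) M cnt L CL
      = pvG (n : Int) ((List.range' r k).filter (pvIsBrk cs)) M L := by
  intro k
  induction k with
  | zero =>
      intro r M cnt L CL hk _ _ hL1 hM _ _ _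
      simp only [List.range'_zero, pvALoop, List.filter_nil, pvG]
      omega
  | succ k ih =>
      intro r M cnt L CL hk hr hL0 hL1 hM hcnt hCL hM2
      have hkr : r + 1 + k = n := by omega
      have e1 : r + 1 - 1 = r := by omega
      have e2 : r + 1 - 2 = r - 1 := by omega
      have hmemF : ∀ i ∈ (List.range' (r+1) k).filter (pvIsBrk cs), r + 1 ≤ i ∧ (i : Int) < (n : Int) := by
        intro i hi
        have h := List.mem_range'_1.mp (List.mem_of_mem_filter hi)
        exact ⟨h.1, by omega⟩
      rw [List.range'_succ]
      by_cases hA : cs.getD r ' ' = cs.getD (r - 1) ' '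
      · by_cases hP : 2 ≤ r ∧ cs.getD (r - 1) ' ' = cs.getD (r - 2) ' '
        · have hc3 : cnt + 1 = 3 := by rw [hcnt, if_pos hP]; norm_num
          have hbrk : pvIsBrk cs r = true := by
            simp only [pvIsBrk, Bool.and_eq_true, beq_iff_eq, decide_eq_true_eq]
            exact ⟨⟨hP.1, hA⟩, hP.2⟩
          have hCL' : CL = (r : Int) - L := hCL hP.1
          have hM2' : 2 ≤ M := hM2 hP.1
          rw [List.filter_cons_of_pos hbrk]
          conv_rhs => rw [pvG]
          rw [show max M ((r : Int) - L) = M from by omega]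
          simp only [pvALoop, if_pos hA, hc3, if_true]
          by_cases hE : (n : Int) - ((r : Int) - 1) ≤ CL
          · rw [if_pos hE]
            exact (pvG_absorb (n : Int) r _ M ((r : Int) - 1)
              (fun i hi => ⟨le_trans (by omega) (hmemF i hi).1, (hmemF i hi).2⟩)
              (by omega) (by omega)).symm
          · rw [if_neg hE]
            rw [show (r : Int) - ((r : Int) - 1) + 1 = 2 from by ring]
            rw [ih (r+1) (max M 2) 2 ((r : Int) - 1) 2 hkr (by omega) (by omega)
              (by push_cast; omega) (by push_cast; omega)
              (by rw [e1, e2, if_pos ⟨by omega, hA⟩])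
              (fun _ => by push_cast; ring) (fun _ => by omega)]
            rw [show max M 2 = M from by omega]
        · have hc3 : ¬ (cnt + 1 = 3) := by rw [hcnt, if_neg hP]; norm_num
          have hbrk : pvIsBrk cs r = false := by
            simp only [pvIsBrk, Bool.and_eq_false_iff]
            by_cases h2 : 2 ≤ r
            · right
              have hne : ¬ cs.getD (r-1) ' ' = cs.getD (r-2) ' ' := fun h => hP ⟨h2, h⟩
              simpa using hne
            · left; left; simpa using h2
          have hcnt1 : cnt = 1 := by rw [hcnt, if_neg hP]
          rw [List.filter_cons_of_neg (by simp [hbrk])]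
          simp only [pvALoop, if_pos hA, if_neg hc3]
          rw [ih (r+1) (max M ((r : Int) - L + 1)) (cnt + 1) L ((r : Int) - L + 1) hkr
            (by omega) hL0 (by push_cast; omega) (by push_cast; omega)
            (by rw [e1, e2, if_pos ⟨by omega, hA⟩]; omega)
            (fun _ => by push_cast; ring) (fun _ => by omega)]
          rw [show max M ((r : Int) - L + 1) = max M ((r : Int) + 1 - L) from by ring_nf, pvG_max]
          have hge : (r : Int) + 1 - L ≤ pvG (n : Int) ((List.range' (r+1) k).filter (pvIsBrk cs)) M L := by
            apply pvG_ge _ _ _ _ _ _ (by omega)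
            intro i hi
            have h := (hmemF i hi).1
            have h' : ((r : Int) + 1) ≤ (i : Int) := by exact_mod_cast h
            omega
          omega
      · have hbrk : pvIsBrk cs r = false := by
          simp only [pvIsBrk, Bool.and_eq_false_iff]
          left; right; simpa using hA
        have hcnt2 : cnt = 2 ∨ cnt = 1 := by split at hcnt <;> omega
        rw [List.filter_cons_of_neg (by simp [hbrk])]
        simp only [pvALoop, if_neg hA]
        rw [ih (r+1) (max M ((r : Int) - L + 1)) 1 L ((r : Int) - L + 1) hkr
          (by omega) hL0 (by push_cast; omega) (by push_cast; omega)
          (by rw [e1, e2, if_neg (fun h => hA h.2)])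
          (fun _ => by push_cast; ring) (fun _ => by omega)]
        rw [show max M ((r : Int) - L + 1) = max M ((r : Int) + 1 - L) from by ring_nf, pvG_max]
        have hge : (r : Int) + 1 - L ≤ pvG (n : Int) ((List.range' (r+1) k).filter (pvIsBrk cs)) M L := by
          apply pvG_ge _ _ _ _ _ _ (by omega)
          intro i hi
          have h := (hmemF i hi).1
          have h' : ((r : Int) + 1) ≤ (i : Int) := by exact_mod_cast h
          omega
        omega

theorem equiv_main (s : String) :
    longestSemiAlternatingSubstring s = longestSemiAlternatingSubstring_alt s := by
  unfold longestSemiAlternatingSubstring longestSemiAlternatingSubstring_alt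
  set cs := s.toList with hcs
  by_cases h0 : cs.length = 0
  · simp [h0]
  · by_cases h3 : cs.length < 3
    · simp [h0, h3]
    · simp only [if_neg h0, if_neg h3]
      have hn3 : 3 ≤ cs.length := by omega
      have hsplit : List.range' 1 (cs.length - 1) = 1 :: List.range' 2 (cs.length - 2) := by
        rw [show cs.length - 1 = (cs.length - 2) + 1 by omega, List.range'_succ]
      have h1brk : pvIsBrk cs 1 = false := by simp [pvIsBrk]
      rw [pvALoop_eq_pvG cs cs.length rfl (cs.length - 1) 1 1 1 0 0 (by omega) le_rfl
        (by omega) (by omega) (by omega) (by norm_num) (by omega) (by omega)]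
      rw [hsplit, List.filter_cons_of_neg (by simp [h1brk])]
      rw [pvG_foldl]
      have hpos : 1 ≤ pvG (cs.length : Int) ((List.range' 2 (cs.length - 2)).filter (pvIsBrk cs)) 0 0 := by
        apply pvG_pos
        · intro i hi
          have := List.mem_range'_1.mp (List.mem_of_mem_filter hi)
          constructor
          · exact this.1
          · exact_mod_cast by omega
        · omega
      rw [show (1 : Int) = max 0 1 by norm_num, pvG_max]
      omega

-- ===== VERDICT (by name: the statement is the Claim_ definition above) =====
theorem longestSemiAlternatingSubstring_spec : Claim_equal_longestSemiAlternatingSubstring := by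
  intro s _
  exact equiv_main s
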